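-- pv_equiv track=rewrite | github.com/smohapatra1/scripting | python/practice/start_again/2024/06202024/breadth-first_search_shortest_reach.py | bfs
-- ===== SOURCE A (Python) =====
-- from collections import defaultdict, deque
--
-- def bfs(n, m, edges, s):
--     # Write your code here
--     graph = defaultdict(set)
--     for start, end in edges:
--         graph[start].add(end)
--         graph[end].add(start)
--
--     # Use hash table to store distances
--     distances = {}
--
--     # Use deque as a queue
--     q = deque([(s, 0)])
--     while q:
--         curr, dist = q.popleft()
--         if curr in distances:
--             continue
--         distances[curr] = dist
--         # push all neighbors to queue along with the distance
--         q.extend([(n, dist+6) for n in graph[curr]])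
--
--     result = []
--     for i in range(1, n+1):
--         if i == s:
--             continue
--         result.append(distances.get(i, -1))
--     return result
-- ===== SOURCE B (Python) =====
-- def bfs(n, m, edges, s):
--     # Level-synchronous BFS: the distance lives in the outer level counter,
--     # not in per-node queue entries.
--     adj = {}
--     for a, b in edges:
--         adj.setdefault(a, set()).add(b)
--         adj.setdefault(b, set()).add(a)
--     distances = {s: 0}
--     frontier = [s]
--     d = 0
--     while frontier:
--         d += 6
--         nxt = []
--         for u in frontier:
--             for v in adj.get(u, ()):
--                 if v not in distances:
--                     distances[v] = d
--                     nxt.append(v)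
--         frontier = nxt
--     return [distances.get(i, -1) for i in range(1, n + 1) if i != s]
-- ===== Notes on version B (the rewrite author's own statement) =====
-- stated objective: alternative
-- what changed: Replaces the per-node FIFO queue of (node, distance) pairs by a level-synchronous BFS: the distance is carried by an outer level counter while each round expands the whole frontier at once into the next frontier, so no distances travel through a queue and already-visited nodes are filtered when a frontier is built rather than when popped.
import Mathlib
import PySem

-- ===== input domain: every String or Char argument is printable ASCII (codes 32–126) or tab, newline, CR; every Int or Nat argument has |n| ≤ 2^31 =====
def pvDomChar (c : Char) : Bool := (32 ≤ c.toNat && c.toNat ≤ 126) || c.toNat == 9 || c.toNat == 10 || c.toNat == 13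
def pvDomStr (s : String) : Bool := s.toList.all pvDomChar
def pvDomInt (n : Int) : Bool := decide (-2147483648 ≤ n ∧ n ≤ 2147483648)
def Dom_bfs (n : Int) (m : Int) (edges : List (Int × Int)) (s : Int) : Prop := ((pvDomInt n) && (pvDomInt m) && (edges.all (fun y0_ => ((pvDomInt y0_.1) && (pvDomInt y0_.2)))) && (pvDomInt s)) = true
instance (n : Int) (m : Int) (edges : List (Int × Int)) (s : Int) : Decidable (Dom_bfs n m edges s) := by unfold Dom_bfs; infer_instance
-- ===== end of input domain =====

-- B re-implements A's BFS level-synchronously (distance carried by an outer level counter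
-- instead of per-node queue entries); same return value, no speed claim.
-- In A, `graph[curr]` iterates a Python set: the returned distances do not depend on that
-- iteration order (all queue entries for a node at the earlier level precede those of the
-- next level), so iterating the PySem.Set's insertion-order list is result-exact.

-- ===== PORT A =====
-- graph = defaultdict(set); graph[start].add(end); graph[end].add(start)
def bfsGraph (edges : List (Int × Int)) : PySem.Dict Int (PySem.Set Int) :=
  edges.foldl (fun graph e =>
    let g1 := graph.insert e.1 (PySem.Set.add (graph.getD e.1 PySem.Set.empty) e.2)
    g1.insert e.2 (PySem.Set.add (g1.getD e.2 PySem.Set.empty) e.1)) PySem.Dict.empty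

-- `graph[curr]` (defaultdict read: inserting the default empty set is unobservable here)
def bfsAdj (g : PySem.Dict Int (PySem.Set Int)) (v : Int) : List Int :=
  PySem.Dict.getD g v PySem.Set.empty

-- termination potential for the queue loop: queue length plus the total adjacency
-- length of the not-yet-visited keys
def bfsWeight (g : PySem.Dict Int (PySem.Set Int)) (dist : PySem.Dict Int Int)
    (l : List Int) : Nat :=
  (l.map (fun k => if dist.contains k then 0 else (bfsAdj g k).length)).sum

theorem bfsAdj_nil_of_not_mem_keys (g : PySem.Dict Int (PySem.Set Int)) (c : Int)
    (h : c ∉ g.keys) : bfsAdj g c = [] := by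
  have hc : g.contains c = false := by
    by_contra hb
    exact h ((PySem.Dict.contains_iff_mem_keys g c).1 (by simpa using hb))
  simp [bfsAdj, PySem.Dict.getD_of_not_contains g _ hc, PySem.Set.empty]

theorem bfsWeight_insert_le (g : PySem.Dict Int (PySem.Set Int)) (dist : PySem.Dict Int Int)
    (c dd : Int) (l : List Int) :
    bfsWeight g (dist.insert c dd) l ≤ bfsWeight g dist l := by
  induction l with
  | nil => simp [bfsWeight]
  | cons k t ih =>
    simp only [bfsWeight, List.map_cons, List.sum_cons] at *
    have hk : (if (dist.insert c dd).contains k then 0 else (bfsAdj g k).length)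
        ≤ (if dist.contains k then 0 else (bfsAdj g k).length) := by
      by_cases h : dist.contains k
      · simp [h, PySem.Dict.contains_insert, Bool.or_true]
      · split_ifs <;> omega
    omega

theorem bfsWeight_insert_add (g : PySem.Dict Int (PySem.Set Int)) (dist : PySem.Dict Int Int)
    (c dd : Int) (l : List Int) (hc : dist.contains c = false)
    (hm : c ∈ l ∨ (bfsAdj g c).length = 0) :
    bfsWeight g (dist.insert c dd) l + (bfsAdj g c).length ≤ bfsWeight g dist l := by
  rcases hm with hm | hm
  · obtain ⟨l1, l2, rfl⟩ := List.append_of_mem hm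
    have h1 := bfsWeight_insert_le g dist c dd l1
    have h2 := bfsWeight_insert_le g dist c dd l2
    simp only [bfsWeight, List.map_append, List.map_cons, List.sum_append, List.sum_cons] at *
    have hcc : (dist.insert c dd).contains c = true := PySem.Dict.contains_insert_self dist c dd
    simp only [hcc, hc, if_true, Bool.false_eq_true, if_false]
    omega
  · have := bfsWeight_insert_le g dist c dd l
    omega

-- the queue loop of A (FIFO queue of (node, distance) pairs)
def bfsLoop (g : PySem.Dict Int (PySem.Set Int)) :
    List (Int × Int) → PySem.Dict Int Int → PySem.Dict Int Int
  | [], dist => dist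
  | (c, dd) :: q, dist =>
    if dist.contains c then bfsLoop g q dist
    else bfsLoop g (q ++ (bfsAdj g c).map (fun v => (v, dd + 6))) (dist.insert c dd)
termination_by q dist => q.length + bfsWeight g dist g.keys
decreasing_by
  · simp only [List.length_cons]; omega
  · have hc : dist.contains c = false := by
      simpa using ‹¬ dist.contains c = true›
    have hm : c ∈ g.keys ∨ (bfsAdj g c).length = 0 := by
      by_cases hk : c ∈ g.keys
      · exact Or.inl hk
      · exact Or.inr (by rw [bfsAdj_nil_of_not_mem_keys g c hk]; rfl)
    have := bfsWeight_insert_add g dist c dd g.keys hc hm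
    simp only [List.length_append, List.length_map, List.length_cons]
    omega

def bfs (n : Int) (m : Int) (edges : List (Int × Int)) (s : Int) : List Int :=
  let graph := bfsGraph edges
  let distances := bfsLoop graph [(s, 0)] PySem.Dict.empty
  (PySem.List.pyRange 1 (n + 1) 1).foldl
    (fun result i => if i = s then result else result ++ [distances.getD i (-1)]) []

-- ===== PORT B =====
-- adj.setdefault(a, set()).add(b) (twice, both directions)
def bfsAltGraph (edges : List (Int × Int)) : PySem.Dict Int (PySem.Set Int) :=
  edges.foldl (fun adj e =>
    let a1 := adj.insert e.1 (PySem.Set.add (adj.getD e.1 PySem.Set.empty) e.2)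
    a1.insert e.2 (PySem.Set.add (a1.getD e.2 PySem.Set.empty) e.1)) PySem.Dict.empty

-- adj.get(u, ()) (iterating the default empty tuple yields nothing, like the empty set)
def bfsAltAdj (g : PySem.Dict Int (PySem.Set Int)) (v : Int) : List Int :=
  PySem.Dict.getD g v PySem.Set.empty

-- body of the inner loop: if v not in distances: distances[v] = d; nxt.append(v)
def bfsVisit (dlvl : Int) (st : PySem.Dict Int Int × List Int) (v : Int) :
    PySem.Dict Int Int × List Int :=
  if st.1.contains v then st else (st.1.insert v dlvl, st.2 ++ [v])

-- one round: for u in frontier: for v in adj.get(u, ()): …  (state = (distances, nxt))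
def bfsLevel (g : PySem.Dict Int (PySem.Set Int)) (dlvl : Int) (frontier : List Int)
    (dist : PySem.Dict Int Int) : PySem.Dict Int Int × List Int :=
  frontier.foldl (fun st u => (bfsAltAdj g u).foldl (bfsVisit dlvl) st) (dist, [])

-- ---- helpers used by bfsAltLoop's termination argument (and by the proofs below) ----
-- the distance dict after visiting a candidate list, and the freshly visited nodes
def pvInsAll (dlvl : Int) : List Int → PySem.Dict Int Int → PySem.Dict Int Int
  | [], dist => dist
  | v :: t, dist =>
    if dist.contains v then pvInsAll dlvl t dist else pvInsAll dlvl t (dist.insert v dlvl)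

def pvNewNodes (dlvl : Int) : List Int → PySem.Dict Int Int → List Int
  | [], _ => []
  | v :: t, dist =>
    if dist.contains v then pvNewNodes dlvl t dist
    else v :: pvNewNodes dlvl t (dist.insert v dlvl)

def bfsUnseen (g : PySem.Dict Int (PySem.Set Int)) (dist : PySem.Dict Int Int) : Nat :=
  ((g.keys ++ g.values.flatten).filter (fun v => ! dist.contains v)).length

theorem foldl_visit_eq (dlvl : Int) (ps : List Int) :
    ∀ (dist : PySem.Dict Int Int) (acc : List Int),
    ps.foldl (bfsVisit dlvl) (dist, acc)
      = (pvInsAll dlvl ps dist, acc ++ pvNewNodes dlvl ps dist) := by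
  induction ps with
  | nil => intro dist acc; simp [pvInsAll, pvNewNodes]
  | cons v t ih =>
    intro dist acc
    cases h : dist.contains v
    · simp [bfsVisit, h, pvInsAll, pvNewNodes, ih]
    · simp [bfsVisit, h, pvInsAll, pvNewNodes, ih]

theorem bfsLevel_eq (g : PySem.Dict Int (PySem.Set Int)) (dlvl : Int) (frontier : List Int)
    (dist : PySem.Dict Int Int) :
    bfsLevel g dlvl frontier dist
      = (pvInsAll dlvl (frontier.flatMap (bfsAltAdj g)) dist,
         pvNewNodes dlvl (frontier.flatMap (bfsAltAdj g)) dist) := by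
  rw [bfsLevel, ← List.foldl_flatMap, foldl_visit_eq]
  simp

theorem contains_pvInsAll_of_contains (dlvl : Int) (ps : List Int) :
    ∀ (dist : PySem.Dict Int Int) (v : Int), dist.contains v = true →
    (pvInsAll dlvl ps dist).contains v = true := by
  induction ps with
  | nil => intro dist v h; simpa [pvInsAll] using h
  | cons x t ih =>
    intro dist v h
    cases hx : dist.contains x
    · simp only [pvInsAll, hx, Bool.false_eq_true, if_false]
      exact ih _ v (by simp [PySem.Dict.contains_insert, h])
    · simpa [pvInsAll, hx] using ih dist v h

theorem mem_pvNewNodes (dlvl : Int) (ps : List Int) :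
    ∀ (dist : PySem.Dict Int Int) (x : Int), x ∈ pvNewNodes dlvl ps dist →
    x ∈ ps ∧ dist.contains x = false := by
  induction ps with
  | nil => intro dist x h; simp [pvNewNodes] at h
  | cons v t ih =>
    intro dist x h
    cases hv : dist.contains v
    · simp only [pvNewNodes, hv, Bool.false_eq_true, if_false, List.mem_cons] at h
      rcases h with rfl | h
      · exact ⟨List.mem_cons_self, hv⟩
      · obtain ⟨h1, h2⟩ := ih _ x h
        refine ⟨List.mem_cons_of_mem _ h1, ?_⟩
        simp only [PySem.Dict.contains_insert] at h2
        rcases Bool.or_eq_false_iff.1 h2 with ⟨_, h2⟩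
        exact h2
    · simp only [pvNewNodes, hv, if_true] at h
      obtain ⟨h1, h2⟩ := ih dist x h
      exact ⟨List.mem_cons_of_mem _ h1, h2⟩

theorem contains_pvInsAll_of_mem_newNodes (dlvl : Int) (ps : List Int) :
    ∀ (dist : PySem.Dict Int Int) (x : Int), x ∈ pvNewNodes dlvl ps dist →
    (pvInsAll dlvl ps dist).contains x = true := by
  induction ps with
  | nil => intro dist x h; simp [pvNewNodes] at h
  | cons v t ih =>
    intro dist x h
    cases hv : dist.contains v
    · simp only [pvNewNodes, hv, Bool.false_eq_true, if_false, List.mem_cons] at h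
      simp only [pvInsAll, hv, Bool.false_eq_true, if_false]
      rcases h with rfl | h
      · exact contains_pvInsAll_of_contains dlvl t _ x (by simp [PySem.Dict.contains_insert])
      · exact ih _ x h
    · simp only [pvNewNodes, hv, if_true] at h
      simpa [pvInsAll, hv] using ih dist x h

theorem pvInsAll_of_newNodes_nil (dlvl : Int) (ps : List Int) :
    ∀ (dist : PySem.Dict Int Int), pvNewNodes dlvl ps dist = [] →
    pvInsAll dlvl ps dist = dist := by
  induction ps with
  | nil => intro dist _; rfl
  | cons v t ih =>
    intro dist h
    cases hv : dist.contains v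
    · simp [pvNewNodes, hv] at h
    · simp only [pvNewNodes, hv, if_true] at h
      simpa [pvInsAll, hv] using ih dist h

theorem bfs_countP_lt {α : Type} (l : List α) (p q : α → Bool) (x : α)
    (mono : ∀ v, p v = true → q v = true) (hx : x ∈ l) (hq : q x = true)
    (hp : p x = false) : l.countP p < l.countP q := by
  induction l with
  | nil => simp at hx
  | cons y t ih =>
    rcases List.mem_cons.1 hx with rfl | hxt
    · have hle : t.countP p ≤ t.countP q := List.countP_mono_left (fun v _ h => mono v h)
      simp [List.countP_cons, hp, hq]
      omega
    · have hlt := ih hxt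
      have hy : (if p y = true then 1 else 0) ≤ (if q y = true then 1 else 0) := by
        cases h : p y
        · simp
        · simp [mono y h]
      simp only [List.countP_cons]
      omega

theorem bfsUnseen_lt (g : PySem.Dict Int (PySem.Set Int)) (dist dist' : PySem.Dict Int Int)
    (x : Int) (hx : x ∈ g.keys ++ g.values.flatten)
    (h0 : dist.contains x = false) (h1 : dist'.contains x = true)
    (mono : ∀ v, dist.contains v = true → dist'.contains v = true) :
    bfsUnseen g dist' < bfsUnseen g dist := by
  simp only [bfsUnseen, ← List.countP_eq_length_filter]
  refine bfs_countP_lt _ _ _ x ?_ hx (by simp [h0]) (by simp [h1])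
  intro v hv
  cases hcv : dist.contains v
  · simp
  · exfalso
    simp [mono v hcv] at hv

theorem bfs_mem_values_of_get? {κ ν : Type} [BEq κ] (d : PySem.Dict κ ν) (k : κ) (S : ν)
    (h : d.get? k = some S) : S ∈ d.values := by
  obtain ⟨l⟩ := d
  induction l with
  | nil => simp [PySem.Dict.get?] at h
  | cons p t ih =>
    obtain ⟨a, b⟩ := p
    rw [PySem.Dict.get?_mk_cons] at h
    cases hk : a == k
    · rw [hk] at h
      simp only [Bool.false_eq_true, if_false] at h
      have := ih h
      rw [PySem.Dict.values_mk] at this ⊢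
      simpa using Or.inr (by simpa using this)
    · rw [hk] at h
      simp at h
      subst h
      simp [PySem.Dict.values_mk]

theorem mem_values_flatten_of_mem_adj (g : PySem.Dict Int (PySem.Set Int)) (u v : Int)
    (h : v ∈ bfsAltAdj g u) : v ∈ g.values.flatten := by
  rw [bfsAltAdj, PySem.Dict.getD_eq_get?_getD] at h
  cases hg : g.get? u with
  | none => rw [hg] at h; simp [PySem.Set.empty] at h
  | some S =>
    rw [hg] at h
    exact List.mem_flatten.2 ⟨S, bfs_mem_values_of_get? g u S hg, h⟩

-- the level loop of B: while frontier: d += 6; one round; recurse on the next frontier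
def bfsAltLoop (g : PySem.Dict Int (PySem.Set Int)) (frontier : List Int)
    (dist : PySem.Dict Int Int) (d : Int) : PySem.Dict Int Int :=
  if h : frontier = [] then dist
  else
    let st := bfsLevel g (d + 6) frontier dist
    bfsAltLoop g st.2 st.1 (d + 6)
termination_by (bfsUnseen g dist, frontier.length)
decreasing_by
  rw [bfsLevel_eq]
  rcases hN : pvNewNodes (d + 6) (frontier.flatMap (bfsAltAdj g)) dist with _ | ⟨x, t⟩
  · rw [pvInsAll_of_newNodes_nil _ _ _ hN]
    simp only [List.length_nil]
    exact Prod.Lex.right _ (by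
      cases frontier with
      | nil => exact absurd rfl h
      | cons a b => simp)
  · have hx : x ∈ pvNewNodes (d + 6) (frontier.flatMap (bfsAltAdj g)) dist := by
      rw [hN]; exact List.mem_cons_self
    obtain ⟨hxp, hxc⟩ := mem_pvNewNodes _ _ _ _ hx
    obtain ⟨u, _, hu⟩ := List.mem_flatMap.1 hxp
    refine Prod.Lex.left _ _ ?_
    exact bfsUnseen_lt g dist _ x
      (List.mem_append_right _ (mem_values_flatten_of_mem_adj g u x hu)) hxc
      (contains_pvInsAll_of_mem_newNodes _ _ _ _ hx)
      (contains_pvInsAll_of_contains _ _ dist)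

def bfs_alt (n : Int) (m : Int) (edges : List (Int × Int)) (s : Int) : List Int :=
  let adj := bfsAltGraph edges
  let distances := bfsAltLoop adj [s] (PySem.Dict.ofList [(s, 0)]) 0
  ((PySem.List.pyRange 1 (n + 1) 1).filter (fun i => ! (i == s))).map
    (fun i => distances.getD i (-1))

-- ===== PRECONDITION & SPEC =====
def Spec_bfs (n : Int) (m : Int) (edges : List (Int × Int)) (s : Int) (out : List Int) : Prop := out = bfs_alt n m edges s
instance (n : Int) (m : Int) (edges : List (Int × Int)) (s : Int) (out : List Int) : Decidable (Spec_bfs n m edges s out) := by unfold Spec_bfs; infer_instance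

-- ===== CLAIM (what is proved, stated in full; the proofs are below) =====
def Claim_equal_bfs : Prop := ∀ (n : Int) (m : Int) (edges : List (Int × Int)) (s : Int), Dom_bfs n m edges s → Spec_bfs n m edges s (bfs n m edges s)

-- ===== LEMMAS AND PROOFS =====

theorem bfsAltGraph_eq (edges : List (Int × Int)) : bfsAltGraph edges = bfsGraph edges := rfl

-- flattening one level of A's queue loop: processing the level-d prefix of the queue
-- inserts exactly the fresh nodes and appends their adjacency lists at level d+6
theorem bfsLoop_nil (g : PySem.Dict Int (PySem.Set Int)) (dist : PySem.Dict Int Int) :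
    bfsLoop g [] dist = dist := by
  rw [bfsLoop]

theorem bfsLoop_cons (g : PySem.Dict Int (PySem.Set Int)) (c dd : Int)
    (q : List (Int × Int)) (dist : PySem.Dict Int Int) :
    bfsLoop g ((c, dd) :: q) dist
      = if dist.contains c then bfsLoop g q dist
        else bfsLoop g (q ++ (bfsAdj g c).map (fun v => (v, dd + 6))) (dist.insert c dd) := by
  rw [bfsLoop]

theorem bfsLoop_level (g : PySem.Dict Int (PySem.Set Int)) (d : Int) : ∀ (xs : List Int),
    ∀ (acc : List Int) (dist : PySem.Dict Int Int),
    bfsLoop g (xs.map (fun v => (v, d)) ++ acc.map (fun v => (v, d + 6))) dist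
      = bfsLoop g ((acc ++ (pvNewNodes d xs dist).flatMap (bfsAdj g)).map
          (fun v => (v, d + 6))) (pvInsAll d xs dist) := by
  intro xs
  induction xs with
  | nil => intro acc dist; simp [pvNewNodes, pvInsAll]
  | cons x t ih =>
    intro acc dist
    simp only [List.map_cons, List.cons_append, bfsLoop_cons]
    cases hx : dist.contains x
    · simp only [hx, Bool.false_eq_true, if_false]
      have hre : (t.map (fun v => (v, d)) ++ acc.map (fun v => (v, d + 6)))
            ++ (bfsAdj g x).map (fun v => (v, d + 6))
          = t.map (fun v => (v, d)) ++ (acc ++ bfsAdj g x).map (fun v => (v, d + 6)) := by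
        simp [List.map_append, List.append_assoc]
      rw [hre, ih (acc ++ bfsAdj g x) (dist.insert x d)]
      simp only [pvNewNodes, pvInsAll, hx, Bool.false_eq_true, if_false]
      congr 1
      simp [List.flatMap_cons, List.append_assoc]
    · simp only [hx, if_true]
      rw [ih acc dist]
      simp only [pvNewNodes, pvInsAll, hx, if_true]

-- the heart: A's queue loop started on a level list equals B's level loop started on the
-- fresh nodes of that list, with those nodes pre-inserted (strong induction on unseen count)
theorem bfsLoop_eq_altLoop (g : PySem.Dict Int (PySem.Set Int)) : ∀ (k : Nat),
    ∀ (xs : List Int) (dist : PySem.Dict Int Int) (d : Int),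
    bfsUnseen g (pvInsAll d xs dist) ≤ k →
    bfsLoop g (xs.map (fun v => (v, d))) dist
      = bfsAltLoop g (pvNewNodes d xs dist) (pvInsAll d xs dist) d := by
  intro k
  induction k using Nat.strong_induction_on with
  | _ k IH =>
  intro xs dist d hk
  have L := bfsLoop_level g d xs [] dist
  simp only [List.map_nil, List.nil_append, List.append_nil] at L
  rw [L]
  cases hN : pvNewNodes d xs dist with
  | nil =>
    simp only [hN, List.flatMap_nil, List.nil_append, List.map_nil, bfsLoop_nil]
    rw [bfsAltLoop]
    simp
  | cons x0 t0 =>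
    rw [← hN]
    have hNne : pvNewNodes d xs dist ≠ [] := by rw [hN]; simp
    conv_rhs => rw [bfsAltLoop]
    rw [dif_neg hNne, bfsLevel_eq]
    rw [show @bfsAltAdj = @bfsAdj from rfl]
    cases hnxt : pvNewNodes (d + 6) ((pvNewNodes d xs dist).flatMap (bfsAdj g))
        (pvInsAll d xs dist) with
    | nil =>
      have L2 := bfsLoop_level g (d + 6) ((pvNewNodes d xs dist).flatMap (bfsAdj g)) []
        (pvInsAll d xs dist)
      simp only [List.map_nil, List.nil_append, List.append_nil, hnxt, List.flatMap_nil,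
        List.map_nil, bfsLoop_nil] at L2
      rw [L2, pvInsAll_of_newNodes_nil _ _ _ hnxt]
      show pvInsAll d xs dist = bfsAltLoop g [] (pvInsAll d xs dist) (d + 6)
      rw [bfsAltLoop]
      simp
    | cons y ty =>
      rw [← hnxt]
      have hy : y ∈ pvNewNodes (d + 6) ((pvNewNodes d xs dist).flatMap (bfsAdj g))
          (pvInsAll d xs dist) := by rw [hnxt]; exact List.mem_cons_self
      obtain ⟨hyp, hyc⟩ := mem_pvNewNodes _ _ _ _ hy
      obtain ⟨u, _, hu⟩ := List.mem_flatMap.1 hyp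
      have hlt : bfsUnseen g (pvInsAll (d + 6)
            ((pvNewNodes d xs dist).flatMap (bfsAdj g)) (pvInsAll d xs dist))
          < bfsUnseen g (pvInsAll d xs dist) :=
        bfsUnseen_lt g _ _ y
          (List.mem_append_right _ (mem_values_flatten_of_mem_adj g u y hu)) hyc
          (contains_pvInsAll_of_mem_newNodes _ _ _ _ hy)
          (contains_pvInsAll_of_contains _ _ _)
      exact IH _ (lt_of_lt_of_le hlt hk) _ _ _ le_rfl

-- the output pass: A's loop with `continue` is B's filter-then-map
theorem bfs_output_eq (D : PySem.Dict Int Int) (s : Int) (r : List Int) :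
    r.foldl (fun result i => if i = s then result else result ++ [D.getD i (-1)]) []
      = (r.filter (fun i => ! (i == s))).map (fun i => D.getD i (-1)) := by
  rw [PySem.List.foldl_congr_mem r
    (fun result i => if i = s then result else result ++ [D.getD i (-1)])
    (fun acc x => if (! (x == s)) = true then acc ++ [D.getD x (-1)] else acc) []
    (by intro acc x _; by_cases hxs : x = s <;> simp [hxs])]
  simpa using PySem.List.foldl_append_if (fun i => ! (i == s)) (fun i => D.getD i (-1)) r []

-- ===== VERDICT (by name: the statement is the Claim_ definition above) =====
theorem bfs_spec : Claim_equal_bfs := by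
  intro n m edges s _
  have h0 : pvNewNodes 0 [s] PySem.Dict.empty = [s] := by
    simp [pvNewNodes, PySem.Dict.contains_empty]
  have h1 : pvInsAll 0 [s] PySem.Dict.empty = PySem.Dict.ofList [(s, 0)] := by
    simp [pvInsAll, PySem.Dict.contains_empty]; rfl
  have hmain := bfsLoop_eq_altLoop (bfsGraph edges)
    (bfsUnseen (bfsGraph edges) (pvInsAll 0 [s] PySem.Dict.empty))
    [s] PySem.Dict.empty 0 le_rfl
  rw [h0, h1] at hmain
  simp only [List.map_cons, List.map_nil] at hmain
  show bfs n m edges s = bfs_alt n m edges s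
  show (PySem.List.pyRange 1 (n + 1) 1).foldl
      (fun result i => if i = s then result
        else result ++ [(bfsLoop (bfsGraph edges) [(s, 0)] PySem.Dict.empty).getD i (-1)]) []
    = ((PySem.List.pyRange 1 (n + 1) 1).filter (fun i => ! (i == s))).map
      (fun i => (bfsAltLoop (bfsAltGraph edges) [s] (PySem.Dict.ofList [(s, 0)]) 0).getD i (-1))
  rw [bfsAltGraph_eq, hmain, bfs_output_eq]
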